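-- pv_equiv track=rewrite | github.com/IgnacioVellido/DS-Assignments | IPCD/Python/relacion_cadenas.py | es_triple_doble
-- ===== SOURCE A (Python) =====
-- from itertools import groupby
--
-- def es_triple_doble(palabra):
--     # Contar ocurrencias
--     groups = groupby(palabra)
--
--     # Pasarlo a lista de pares letra-num
--     counts = []
--     for k, g in groups:
--         counts.append([k,len(list(g))])
--
--     # Comprobar consecutivos
--     for i in range(len(counts)-2):
--         if counts[i][1] == 2 and counts[i+1][1] == 2 and counts[i+2][1] == 2:
--             return True
--
--     return False
-- ===== SOURCE B (Python) =====
-- def es_triple_doble(palabra):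
--     cur = None
--     runlen = 0
--     streak = 0
--     for ch in palabra:
--         if ch == cur:
--             runlen += 1
--         else:
--             if runlen == 2:
--                 streak += 1
--                 if streak == 3:
--                     return True
--             else:
--                 streak = 0
--             cur = ch
--             runlen = 1
--     if runlen == 2:
--         streak += 1
--     return streak >= 3
-- ===== Notes on version B (the rewrite author's own statement) =====
-- stated objective: faster
-- what changed: Replaces groupby-into-a-counts-list plus an index-windowed second scan by a single pass over the characters maintaining only three counters (current char, run length, streak of consecutive length-2 runs) with early exit.
import Mathlib
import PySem

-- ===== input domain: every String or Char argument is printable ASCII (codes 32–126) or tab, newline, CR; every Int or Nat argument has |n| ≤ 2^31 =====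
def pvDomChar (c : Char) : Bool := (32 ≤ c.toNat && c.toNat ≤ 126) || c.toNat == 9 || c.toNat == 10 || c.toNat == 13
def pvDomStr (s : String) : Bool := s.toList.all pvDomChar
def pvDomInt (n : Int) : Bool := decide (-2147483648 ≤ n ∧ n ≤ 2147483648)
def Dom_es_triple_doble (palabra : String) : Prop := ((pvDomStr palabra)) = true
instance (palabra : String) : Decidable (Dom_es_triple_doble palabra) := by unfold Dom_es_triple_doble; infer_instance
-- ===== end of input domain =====

-- B replaces A's groupby+counts-list+windowed index scan with a one-pass O(1)-space counter scan with early exit (return value equivalence proved below).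


-- ===== PORT A =====
-- itertools.groupby consumed into the counts list: fold keeping (current key, its count, finished groups)
def esA_step (st : Option Char × Nat × List (Char × Nat)) (ch : Char) :
    Option Char × Nat × List (Char × Nat) :=
  match st with
  | (some k, cnt, acc) =>
      if ch = k then (some k, cnt + 1, acc)
      else (some ch, 1, acc ++ [(k, cnt)])
  | (none, _, acc) => (some ch, 1, acc)

def esA_counts (palabra : String) : List (Char × Nat) :=
  match palabra.toList.foldl esA_step (none, 0, []) with
  | (some k, cnt, acc) => acc ++ [(k, cnt)]
  | (none, _, acc) => acc

-- the 'for i in range(len(counts)-2)' window scan; the early 'return True' becomes '||'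
def es_triple_doble (palabra : String) : Bool :=
  (List.range ((esA_counts palabra).length - 2)).foldl
    (fun a i =>
      a || (((esA_counts palabra).getD i default).2 == 2 &&
            ((esA_counts palabra).getD (i + 1) default).2 == 2 &&
            ((esA_counts palabra).getD (i + 2) default).2 == 2))
    false

-- ===== PORT B =====
-- one pass: (done?, current char, run length, streak of consecutive length-2 runs); early return = done flag
def esB_step (st : Bool × Option Char × Nat × Nat) (ch : Char) : Bool × Option Char × Nat × Nat :=
  match st with
  | (true, cur, runlen, streak) => (true, cur, runlen, streak)
  | (false, cur, runlen, streak) =>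
      if some ch = cur then (false, cur, runlen + 1, streak)
      else if runlen = 2 then
        if streak + 1 = 3 then (true, some ch, 1, streak + 1)
        else (false, some ch, 1, streak + 1)
      else (false, some ch, 1, 0)

def es_triple_doble_alt (palabra : String) : Bool :=
  match palabra.toList.foldl esB_step (false, none, 0, 0) with
  | (true, _, _, _) => true
  | (false, _, runlen, streak) => decide (3 ≤ if runlen = 2 then streak + 1 else streak)

-- ===== PRECONDITION & SPEC =====
def Spec_es_triple_doble (palabra : String) (out : Bool) : Prop := out = es_triple_doble_alt palabra
instance (palabra : String) (out : Bool) : Decidable (Spec_es_triple_doble palabra out) := by unfold Spec_es_triple_doble; infer_instance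

-- ===== CLAIM (what is proved, stated in full; the proofs are below) =====
def Claim_equal_es_triple_doble : Prop := ∀ (palabra : String), Dom_es_triple_doble palabra → Spec_es_triple_doble palabra (es_triple_doble palabra)

-- ===== LEMMAS AND PROOFS =====

-- three consecutive 2s somewhere in a list of run lengths
def check3 : List Nat → Bool
  | a :: b :: c :: t => (a == 2 && b == 2 && c == 2) || check3 (b :: c :: t)
  | _ => false

-- length of the leading block of 2s
def lead2 : List Nat → Nat
  | 2 :: t => lead2 t + 1
  | _ => 0

lemma lead2_cons (c : Nat) (l : List Nat) :
    lead2 (c :: l) = if c = 2 then lead2 l + 1 else 0 := by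
  cases c with
  | zero => simp [lead2]
  | succ n => cases n with
    | zero => simp [lead2]
    | succ m => cases m with
      | zero => simp [lead2]
      | succ p => simp [lead2]

lemma lead2_le_length (l : List Nat) : lead2 l ≤ l.length := by
  induction l with
  | nil => simp [lead2]
  | cons c t ih => rw [lead2_cons]; split_ifs <;> simp <;> omega

lemma check3_cons (c : Nat) (l : List Nat) :
    check3 (c :: l) = (check3 l || (decide (c = 2) && decide (2 ≤ lead2 l))) := by
  match l with
  | [] => simp [check3, lead2]
  | [a] =>
      simp only [check3, lead2_cons, lead2, Bool.false_or]
      split_ifs <;> simp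
  | a :: b :: t =>
      rw [show check3 (c :: a :: b :: t) = ((c == 2 && a == 2 && b == 2) || check3 (a :: b :: t)) from rfl]
      have h2 : (2 ≤ lead2 (a :: b :: t)) ↔ (a = 2 ∧ b = 2) := by
        rw [lead2_cons, lead2_cons]
        split_ifs <;> simp <;> omega
      rw [Bool.eq_iff_iff]
      simp [h2]
      tauto

lemma check3_false_lead2 (l : List Nat) (h : check3 l = false) : lead2 l ≤ 2 := by
  by_contra hc
  simp only [not_le] at hc
  match l with
  | [] => simp [lead2] at hc
  | [a] => have := lead2_le_length [a]; simp at this; omega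
  | [a, b] => have := lead2_le_length [a, b]; simp at this; omega
  | a :: b :: c :: t =>
      rw [lead2_cons, lead2_cons, lead2_cons] at hc
      have ha : a = 2 := by by_contra h'; simp [h'] at hc
      rw [if_pos ha] at hc
      have hb : b = 2 := by by_contra h'; simp [h'] at hc
      rw [if_pos hb] at hc
      have hcc : c = 2 := by by_contra h'; simp [h'] at hc
      simp [check3, ha, hb, hcc] at h

lemma check3_iff (l : List Nat) :
    check3 l = true ↔
      ∃ i, i + 3 ≤ l.length ∧ l.getD i 0 = 2 ∧ l.getD (i + 1) 0 = 2 ∧ l.getD (i + 2) 0 = 2 := by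
  induction l using check3.induct with
  | case1 a b c t ih =>
      rw [show check3 (a :: b :: c :: t) = ((a == 2 && b == 2 && c == 2) || check3 (b :: c :: t)) from rfl]
      simp only [Bool.or_eq_true, Bool.and_eq_true, beq_iff_eq]
      constructor
      · rintro (⟨⟨ha, hb⟩, hc⟩ | h)
        · exact ⟨0, by simp, by simpa using ha, by simpa using hb, by simpa using hc⟩
        · obtain ⟨i, hlen, h0, h1, h2⟩ := ih.mp h
          exact ⟨i + 1, by simp at hlen ⊢; omega, by simpa using h0, by simpa using h1,
            by simpa using h2⟩
      · rintro ⟨i, hlen, h0, h1, h2⟩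
        cases i with
        | zero =>
            left
            simp only [List.getD_cons_zero, List.getD_cons_succ] at h0 h1 h2
            exact ⟨⟨h0, h1⟩, h2⟩
        | succ j =>
            right
            exact ih.mpr ⟨j, by simp at hlen ⊢; omega, by simpa using h0, by simpa using h1,
              by simpa using h2⟩
  | case2 l h =>
      constructor
      · intro hc
        exfalso
        match l, h with
        | [], _ => simp [check3] at hc
        | [a], _ => simp [check3] at hc
        | [a, b], _ => simp [check3] at hc
        | a :: b :: c :: t, h => exact (h a b c t rfl).elim
      · rintro ⟨i, hlen, _⟩
        exfalso
        match l, h with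
        | [], _ => simp at hlen
        | [a], _ => simp at hlen
        | [a, b], _ => simp at hlen
        | a :: b :: c :: t, h => exact (h a b c t rfl).elim

lemma getD_reverse (l : List Nat) (i : Nat) (h : i < l.length) :
    l.reverse.getD i 0 = l.getD (l.length - 1 - i) 0 := by
  have h' : i < l.reverse.length := by simpa using h
  have h'' : l.length - 1 - i < l.length := by omega
  rw [List.getD_eq_getElem?_getD, List.getD_eq_getElem?_getD,
    List.getElem?_eq_getElem h', List.getElem?_eq_getElem h'']
  simp [List.getElem_reverse]

lemma check3_reverse_le (l : List Nat) (h : check3 l.reverse = true) : check3 l = true := by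
  rw [check3_iff] at h ⊢
  obtain ⟨i, hlen, h0, h1, h2⟩ := h
  simp only [List.length_reverse] at hlen
  rw [getD_reverse _ _ (by omega)] at h0 h1 h2
  refine ⟨l.length - 3 - i, by omega, ?_, ?_, ?_⟩
  · rw [show l.length - 3 - i = l.length - 1 - (i + 2) from by omega]; exact h2
  · rw [show l.length - 3 - i + 1 = l.length - 1 - (i + 1) from by omega]; exact h1
  · rw [show l.length - 3 - i + 2 = l.length - 1 - i from by omega]; exact h0

lemma check3_reverse (l : List Nat) : check3 l.reverse = check3 l := by
  rw [Bool.eq_iff_iff]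
  constructor
  · exact check3_reverse_le l
  · intro h
    exact check3_reverse_le l.reverse (by simpa using h)

lemma foldl_or (p : Nat → Bool) (l : List Nat) (b : Bool) :
    l.foldl (fun a i => a || p i) b = (b || l.any p) := by
  induction l generalizing b with
  | nil => simp
  | cons x xs ih => simp [List.foldl_cons, ih, Bool.or_assoc]

lemma getD_map_snd (counts : List (Char × Nat)) (i : Nat) (h : i < counts.length) :
    (counts.map Prod.snd).getD i 0 = (counts.getD i default).2 := by
  rw [List.getD_eq_getElem?_getD, List.getD_eq_getElem?_getD, List.getElem?_map,
    List.getElem?_eq_getElem h]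
  simp

lemma scanA_eq (counts : List (Char × Nat)) :
    (List.range (counts.length - 2)).foldl
      (fun a i =>
        a || ((counts.getD i default).2 == 2 && (counts.getD (i + 1) default).2 == 2 &&
              (counts.getD (i + 2) default).2 == 2))
      false = check3 (counts.map Prod.snd) := by
  rw [foldl_or, Bool.false_or, Bool.eq_iff_iff, List.any_eq_true, check3_iff]
  simp only [List.mem_range, Bool.and_eq_true, beq_iff_eq, List.length_map]
  constructor
  · rintro ⟨i, hi, ⟨h0, h1⟩, h2⟩
    refine ⟨i, by omega, ?_, ?_, ?_⟩ <;>
      rw [getD_map_snd _ _ (by omega)] <;> assumption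
  · rintro ⟨i, hi, h0, h1, h2⟩
    rw [getD_map_snd _ _ (by omega)] at h0 h1 h2
    exact ⟨i, by omega, ⟨h0, h1⟩, h2⟩

def countsOf : Option Char × Nat × List (Char × Nat) → List (Char × Nat)
  | (some k, cnt, acc) => acc ++ [(k, cnt)]
  | (none, _, acc) => acc

def finishB : Bool × Option Char × Nat × Nat → Bool
  | (true, _, _, _) => true
  | (false, _, runlen, streak) => decide (3 ≤ if runlen = 2 then streak + 1 else streak)

lemma esA_counts_eq (palabra : String) :
    esA_counts palabra = countsOf (palabra.toList.foldl esA_step (none, 0, [])) := by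
  unfold esA_counts
  rcases palabra.toList.foldl esA_step (none, 0, []) with ⟨_ | k, cnt, acc⟩ <;> rfl

lemma alt_eq_finishB (palabra : String) :
    es_triple_doble_alt palabra = finishB (palabra.toList.foldl esB_step (false, none, 0, 0)) := by
  unfold es_triple_doble_alt
  rcases palabra.toList.foldl esB_step (false, none, 0, 0) with ⟨_ | _, c, r, s⟩ <;> rfl

lemma A_eq (palabra : String) :
    es_triple_doble palabra
      = check3 (((countsOf (palabra.toList.foldl esA_step (none, 0, []))).map Prod.snd).reverse) := by
  unfold es_triple_doble
  rw [scanA_eq, esA_counts_eq, check3_reverse]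

lemma foldB_true (rest : List Char) (c : Option Char) (r s : Nat) :
    rest.foldl esB_step (true, c, r, s) = (true, c, r, s) := by
  induction rest with
  | nil => rfl
  | cons ch t ih => simp [List.foldl_cons, esB_step, ih]

lemma foldA_true (rest : List Char) (k : Char) (cnt : Nat) (acc : List (Char × Nat))
    (h : check3 ((acc.map Prod.snd).reverse) = true) :
    check3 (((countsOf (rest.foldl esA_step (some k, cnt, acc))).map Prod.snd).reverse) = true := by
  induction rest generalizing k cnt acc with
  | nil =>
      simp only [List.foldl_nil, countsOf, List.map_append, List.reverse_append]
      simp only [List.map_cons, List.map_nil, List.reverse_cons, List.reverse_nil, List.nil_append,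
        List.cons_append, List.nil_append]
      rw [check3_cons, h]
      rfl
  | cons ch t ih =>
      simp only [List.foldl_cons, esA_step]
      by_cases hck : ch = k
      · rw [if_pos hck]; exact ih k (cnt + 1) acc h
      · rw [if_neg hck]
        apply ih
        simp only [List.map_append, List.reverse_append, List.map_cons, List.map_nil,
          List.reverse_cons, List.reverse_nil, List.nil_append, List.cons_append, List.nil_append]
        rw [check3_cons, h]
        rfl

lemma rev_append_pair (acc : List (Char × Nat)) (k : Char) (cnt : Nat) :
    ((acc ++ [(k, cnt)]).map Prod.snd).reverse = cnt :: (acc.map Prod.snd).reverse := by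
  simp

lemma mainF (rest : List Char) (k : Char) (cnt : Nat) (acc : List (Char × Nat)) (streak : Nat)
    (hch : check3 ((acc.map Prod.snd).reverse) = false)
    (hst : streak = lead2 ((acc.map Prod.snd).reverse)) :
    check3 (((countsOf (rest.foldl esA_step (some k, cnt, acc))).map Prod.snd).reverse)
      = finishB (rest.foldl esB_step (false, some k, cnt, streak)) := by
  induction rest generalizing k cnt acc streak with
  | nil =>
      simp only [List.foldl_nil, countsOf, finishB, rev_append_pair]
      rw [check3_cons, hch, Bool.false_or]
      subst hst
      have hle : lead2 ((acc.map Prod.snd).reverse) ≤ 2 := check3_false_lead2 _ hch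
      rw [Bool.eq_iff_iff]
      by_cases hc2 : cnt = 2 <;> simp [hc2] <;> omega
  | cons ch t ih =>
      simp only [List.foldl_cons, esA_step, esB_step]
      by_cases hck : ch = k
      · rw [if_pos hck, if_pos (by rw [hck])]
        exact ih k (cnt + 1) acc streak hch hst
      · rw [if_neg hck, if_neg (by simp [hck])]
        have hflush : check3 (((acc ++ [(k, cnt)]).map Prod.snd).reverse)
            = (decide (cnt = 2) && decide (2 ≤ streak)) := by
          rw [rev_append_pair, check3_cons, hch, Bool.false_or, hst]
        have hlead : lead2 (((acc ++ [(k, cnt)]).map Prod.snd).reverse)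
            = if cnt = 2 then streak + 1 else 0 := by
          rw [rev_append_pair, lead2_cons, hst]
        by_cases hc2 : cnt = 2
        · rw [if_pos hc2]
          by_cases hs3 : streak + 1 = 3
          · rw [if_pos hs3, foldB_true]
            have : check3 (((acc ++ [(k, cnt)]).map Prod.snd).reverse) = true := by
              rw [hflush]; simp [hc2]; omega
            rw [foldA_true t ch 1 _ this]
            rfl
          · rw [if_neg hs3]
            apply ih
            · rw [hflush]
              have hle : lead2 ((acc.map Prod.snd).reverse) ≤ 2 := check3_false_lead2 _ hch
              simp [hc2]
              omega
            · rw [hlead, if_pos hc2]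
        · rw [if_neg hc2]
          apply ih
          · rw [hflush]; simp [hc2]
          · rw [hlead, if_neg hc2]

theorem es_triple_doble_spec : Claim_equal_es_triple_doble := by
  intro palabra _
  unfold Spec_es_triple_doble
  rw [A_eq, alt_eq_finishB]
  cases h : palabra.toList with
  | nil => rfl
  | cons c cs =>
      simp only [List.foldl_cons, esA_step, esB_step]
      norm_num
      exact mainF cs c 1 [] 0 rfl rfl
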